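-- pv_equiv track=rewrite | github.com/pandiarajan-src/IKJourney | ik6_find_winners_of_election.py | find_winner_of_election
-- ===== SOURCE A (Python) =====
-- def find_winner_of_election(votes: list[str]) -> str:
--     """
--         Time Complexity: O(n)
--         Space Complexity: O(1)
--     """
--     vote_count = {}
--     for vote in votes:
--         if vote not in vote_count:
--             vote_count[vote] = 1
--         else:
--             vote_count[vote] += 1
--     max_vote = max(vote_count.values())
--     # return min(vote_count, key=vote_count.get)
--     max_vote_candidates = [candidate
--                            for candidate, v_count in vote_count.items()
--                            if v_count == max_vote
--                            ]
--     return min(max_vote_candidates)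
-- ===== SOURCE B (Python) =====
-- def find_winner_of_election(votes: list[str]) -> str:
--     # Sort the votes: equal candidates become adjacent runs, runs appear in
--     # lexicographic order, so the first run reaching the maximal length wins
--     # (strict '>' keeps the earlier, i.e. lexicographically smaller, candidate).
--     best = None
--     best_count = 0
--     cur = None
--     cur_count = 0
--     for v in sorted(votes):
--         if v == cur:
--             cur_count += 1
--         else:
--             cur, cur_count = v, 1
--         if cur_count > best_count:
--             best, best_count = cur, cur_count
--     if best is None:
--         raise ValueError("empty election")
--     return best
-- ===== Notes on version B (the rewrite author's own statement) =====
-- stated objective: alternative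
-- what changed: Replaces A's hash-counting dictionary plus max/filter/min passes by sort-then-scan: sort the votes so equal candidates form adjacent runs in lexicographic order, then one run-length scan keeps the first run that strictly exceeds the best length, which is automatically the lexicographically smallest candidate at the maximal count.
import Mathlib
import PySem

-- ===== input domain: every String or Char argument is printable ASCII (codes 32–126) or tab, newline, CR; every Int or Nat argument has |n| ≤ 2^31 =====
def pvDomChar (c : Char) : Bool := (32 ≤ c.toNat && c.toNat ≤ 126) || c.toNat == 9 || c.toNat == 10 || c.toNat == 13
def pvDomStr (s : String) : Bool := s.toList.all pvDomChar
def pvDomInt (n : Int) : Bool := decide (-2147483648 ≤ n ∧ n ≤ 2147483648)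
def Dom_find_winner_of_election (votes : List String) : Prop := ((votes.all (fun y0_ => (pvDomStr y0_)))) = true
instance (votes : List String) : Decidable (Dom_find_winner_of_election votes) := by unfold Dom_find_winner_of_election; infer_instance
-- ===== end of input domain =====

-- B replaces A's dict counting + max/filter/min by sort-then-scan over adjacent runs; same return value, different algorithm.

-- ===== PORT A =====
def find_winner_of_election (votes : List String) : String :=
  -- vote_count loop: 'if vote not in vote_count: vote_count[vote] = 1 else: vote_count[vote] += 1'
  let vote_count : PySem.Dict String Int := votes.foldl (fun d vote =>
    if d.contains vote = false then d.insert vote 1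
    else d.modify vote 0 (· + 1)) PySem.Dict.empty
  -- max(vote_count.values()): raises ValueError on an empty dict, excluded by Pre_ (getD 0 unreachable there)
  let max_vote : Int := (PySem.List.max? vote_count.values (fun x => x)).getD 0
  let max_vote_candidates : List String :=
    vote_count.items.filterMap (fun p => if p.2 = max_vote then some p.1 else none)
  -- min(...): raises on empty, excluded by Pre_
  (PySem.List.min? max_vote_candidates (fun x => x)).getD ""

-- ===== PORT B =====
-- one step of B's scan; state = (best, best_count, cur, cur_count);
-- 'v == cur' with cur = None is Python's False, ported by the match
def bStep (st : Option String × Int × Option String × Int) (v : String) :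
    Option String × Int × Option String × Int :=
  match st with
  | (best, bc, cur, cc) =>
    let same : Bool := match cur with | some c => v == c | none => false
    let cur' := if same then cur else some v
    let cc' := if same then cc + 1 else 1
    if bc < cc' then (cur', cc', cur', cc') else (best, bc, cur', cc')

def find_winner_of_election_alt (votes : List String) : String :=
  let r := (PySem.List.sorted votes (fun x => x) false).foldl bStep (none, 0, none, 0)
  -- 'if best is None: raise ValueError' — excluded by Pre_
  match r.1 with
  | some c => c
  | none => ""

-- ===== PRECONDITION & SPEC =====
-- Pre_ excludes only the empty vote list, on which A raises ValueError (max() of an empty sequence)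
def Pre_find_winner_of_election (votes : List String) : Prop := votes ≠ []
instance (votes : List String) : Decidable (Pre_find_winner_of_election votes) := by
  unfold Pre_find_winner_of_election; infer_instance
def pvWitness_find_winner_of_election : List String := (["a", "b", "a"])

def Spec_find_winner_of_election (votes : List String) (out : String) : Prop :=
  out = find_winner_of_election_alt votes
instance (votes : List String) (out : String) : Decidable (Spec_find_winner_of_election votes out) := by
  unfold Spec_find_winner_of_election; infer_instance

-- ===== CLAIM (what is proved, stated in full; the proofs are below) =====
def Claim_equal_find_winner_of_election : Prop := ∀ (votes : List String),
  Dom_find_winner_of_election votes → Pre_find_winner_of_election votes →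
  Spec_find_winner_of_election votes (find_winner_of_election votes)

-- ===== LEMMAS AND PROOFS =====

-- w is THE winner of votes: present, with maximal count, least among the maximal
def VSpec (votes : List String) (w : String) : Prop :=
  w ∈ votes ∧ (∀ v ∈ votes, votes.count v ≤ votes.count w) ∧
    (∀ v ∈ votes, votes.count v = votes.count w → w ≤ v)

lemma VSpec_unique {votes : List String} {w w' : String}
    (h : VSpec votes w) (h' : VSpec votes w') : w = w' := by
  obtain ⟨hm, hle, hmin⟩ := h
  obtain ⟨hm', hle', hmin'⟩ := h'
  have hcc : votes.count w = votes.count w' := le_antisymm (hle' _ hm) (hle _ hm')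
  exact le_antisymm (hmin _ hm' hcc.symm) (hmin' _ hm hcc)

-- A's counting loop builds Counter(votes)
lemma dictA_eq_counter (votes : List String) :
    votes.foldl (fun d vote =>
      if d.contains vote = false then d.insert vote 1
      else d.modify vote 0 (· + 1)) PySem.Dict.empty = PySem.Dict.counter votes := by
  rw [PySem.Dict.counter_eq_foldl]
  apply PySem.List.foldl_congr_mem
  intro d vote _
  by_cases h : d.contains vote = false
  · simp [h, PySem.Dict.insert, PySem.Dict.modify, PySem.Dict.getD_of_not_contains]
  · simp [h]

-- A's result is the winner
lemma A_VSpec (votes : List String) (hne : votes ≠ []) :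
    VSpec votes (find_winner_of_election votes) := by
  have hitems : (PySem.Dict.counter votes).items
      = (PySem.Set.ofList votes).map (fun k => (k, (votes.count k : Int))) :=
    PySem.Dict.items_counter votes
  set l := (PySem.Dict.counter votes).items with hl
  have hlne : l ≠ [] := by
    cases votes with
    | nil => exact absurd rfl hne
    | cons v vs =>
      intro h
      have hv : v ∈ PySem.Set.ofList (v :: vs) :=
        (PySem.Set.mem_ofList _ _).mpr List.mem_cons_self
      rw [hitems] at h
      rcases List.map_eq_nil_iff.mp h with h0
      rw [h0] at hv; cases hv
  have hvals : (PySem.Dict.counter votes).values = l.map Prod.snd := rfl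
  obtain ⟨m, hm⟩ : ∃ m, PySem.List.max? (l.map Prod.snd) (fun x => x) = some m := by
    cases hmx : PySem.List.max? (l.map Prod.snd) (fun x => x) with
    | none => exact absurd (by simpa using (PySem.List.max?_eq_none_iff _ _).mp hmx) hlne
    | some m => exact ⟨m, rfl⟩
  have hmmem : m ∈ l.map Prod.snd := PySem.List.max?_mem hm
  have hmax : ∀ p ∈ l, p.2 ≤ m := by
    intro p hp
    simpa using PySem.List.max?_isMax hm p.2 (List.mem_map_of_mem hp)
  obtain ⟨q, hq, hq2⟩ := List.mem_map.mp hmmem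
  set cands := l.filterMap (fun p => if p.2 = m then some p.1 else none) with hcands
  have hq1 : q.1 ∈ cands := List.mem_filterMap.mpr ⟨q, hq, by rw [hq2]; simp⟩
  obtain ⟨w, hw⟩ : ∃ w, PySem.List.min? cands (fun x => x) = some w := by
    cases hmn : PySem.List.min? cands (fun x => x) with
    | none =>
      rw [PySem.List.min?_eq_none_iff] at hmn
      rw [hmn] at hq1; cases hq1
    | some w => exact ⟨w, rfl⟩
  have hwmem : w ∈ cands := PySem.List.min?_mem hw
  obtain ⟨r, hr, hrw⟩ := List.mem_filterMap.mp hwmem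
  have hr2 : r.2 = m := by by_contra h; simp [h] at hrw
  have hrw1 : r.1 = w := by simp [hr2] at hrw; exact hrw
  have hres : find_winner_of_election votes = w := by
    unfold find_winner_of_election
    rw [dictA_eq_counter]
    simp only [← hl, hvals, hm, Option.getD_some, ← hcands, hw]
  -- translate the items-level facts to votes-level counts
  have hmemElem : ∀ k, k ∈ votes → (k, (votes.count k : Int)) ∈ l := by
    intro k hk
    rw [hitems]
    exact List.mem_map_of_mem ((PySem.Set.mem_ofList _ _).mpr hk)
  have hElem : ∀ p ∈ l, p.1 ∈ votes ∧ p.2 = (votes.count p.1 : Int) := by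
    intro p hp
    rw [hitems] at hp
    obtain ⟨k, hk, rfl⟩ := List.mem_map.mp hp
    exact ⟨(PySem.Set.mem_ofList _ _).mp hk, rfl⟩
  obtain ⟨hwv, hwc⟩ := hElem r hr
  rw [hrw1] at hwv
  have hwcm : (votes.count w : Int) = m := by rw [← hrw1, ← hwc, hr2]
  rw [hres]
  refine ⟨hwv, ?_, ?_⟩
  · intro v hv
    have h2 : ((votes.count v : Int)) ≤ (votes.count w : Int) := by
      rw [hwcm]; exact hmax _ (hmemElem v hv)
    exact_mod_cast h2
  · intro v hv hc
    have hvc : ((votes.count v : Int)) = m := by rw [← hwcm]; exact_mod_cast hc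
    have hv1 : v ∈ cands := List.mem_filterMap.mpr ⟨(v, (votes.count v : Int)), hmemElem v hv, by rw [hvc]; simp⟩
    simpa using PySem.List.min?_isMin hw v hv1

-- B-side: the invariant carried by the run scan over the prefix p already processed
def InvB (p : List String) (st : Option String × Int × Option String × Int) : Prop :=
  match st with
  | (best, bc, cur, cc) =>
    (p = [] → best = none ∧ bc = 0 ∧ cur = none ∧ cc = 0) ∧
    (p ≠ [] → ∃ w x, best = some w ∧ cur = some x ∧
      x ∈ p ∧ (∀ y ∈ p, y ≤ x) ∧ cc = (p.count x : Int) ∧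
      w ∈ p ∧ bc = (p.count w : Int) ∧
      (∀ v ∈ p, (p.count v : Int) ≤ bc) ∧
      (∀ v ∈ p, (p.count v : Int) = bc → w ≤ v))

lemma cnt_app (p : List String) (v y : String) :
    (p ++ [v]).count y = p.count y + (if v = y then 1 else 0) := by
  simp [List.count_append, List.count_cons]

lemma InvB_step (p : List String) (st : Option String × Int × Option String × Int)
    (v : String) (hinv : InvB p st) (hub : ∀ y ∈ p, y ≤ v) :
    InvB (p ++ [v]) (bStep st v) := by
  obtain ⟨best, bc, cur, cc⟩ := st
  obtain ⟨hnil, hcons⟩ := hinv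
  by_cases hp : p = []
  · subst hp
    obtain ⟨hb, hbc, hc, hcc⟩ := hnil rfl
    subst hb; subst hbc; subst hc; subst hcc
    refine ⟨by simp, fun _ => ?_⟩
    exact ⟨v, v, by simp, by simp, by simp, by simp, by simp,
      by simp, by simp, by simp, by simp⟩
  · obtain ⟨w, x, hb, hc, hxm, hxub, hcc, hwm, hbc, hmax, hmin⟩ := hcons hp
    subst hb; subst hc
    have hwpos : (1 : Int) ≤ bc := by
      rw [hbc]; exact_mod_cast List.one_le_count_iff.mpr hwm
    have hne' : p ++ [v] ≠ [] := by simp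
    by_cases hvx : v = x
    · subst hvx
      have hccv : ((p ++ [v]).count v : Int) = (p.count v : Int) + 1 := by
        rw [cnt_app]; simp
      have hcnt : ∀ y, y ≠ v → ((p ++ [v]).count y : Int) = (p.count y : Int) := by
        intro y hy; rw [cnt_app]; rw [if_neg (fun h : v = y => hy h.symm)]; simp
      by_cases hlt : bc < cc + 1
      · have hstep : bStep (some w, bc, some v, cc) v = (some v, cc + 1, some v, cc + 1) := by
          simp [bStep, hlt]
        rw [hstep]
        refine ⟨by simp, fun _ => ⟨v, v, rfl, rfl, by simp, ?_, ?_, by simp, ?_, ?_, ?_⟩⟩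
        · intro y hy
          rcases List.mem_append.mp hy with h | h
          · exact hxub y h
          · simp at h; simp [h]
        · rw [hccv, hcc]
        · rw [hccv, hcc]
        · intro u hu
          by_cases huv : u = v
          · subst huv; rw [hccv, hcc]
          · rw [hcnt u huv]
            have h1 : (p.count u : Int) ≤ bc := hmax u (by
              rcases List.mem_append.mp hu with h | h
              · exact h
              · simp at h; exact absurd h huv)
            omega
        · intro u hu hcu
          by_cases huv : u = v
          · simp [huv]
          · exfalso
            rw [hcnt u huv] at hcu
            have h1 : (p.count u : Int) ≤ bc := hmax u (by
              rcases List.mem_append.mp hu with h | h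
              · exact h
              · simp at h; exact absurd h huv)
            omega
      · have hstep : bStep (some w, bc, some v, cc) v = (some w, bc, some v, cc + 1) := by
          simp [bStep, hlt]
        rw [hstep]
        refine ⟨by simp, fun _ => ⟨w, v, rfl, rfl, by simp, ?_, ?_,
          List.mem_append.mpr (Or.inl hwm), ?_, ?_, ?_⟩⟩
        · intro y hy
          rcases List.mem_append.mp hy with h | h
          · exact hxub y h
          · simp at h; simp [h]
        · rw [hccv, hcc]
        · have hwv : w ≠ v := by
            intro h; subst h
            rw [hbc] at hlt; rw [hcc] at hlt; omega
          rw [hcnt w hwv]; exact hbc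
        · intro u hu
          by_cases huv : u = v
          · subst huv; rw [hccv, ← hcc]; omega
          · rw [hcnt u huv]
            exact hmax u (by
              rcases List.mem_append.mp hu with h | h
              · exact h
              · simp at h; exact absurd h huv)
        · intro u hu hcu
          by_cases huv : u = v
          · subst huv
            -- count p' u = bc, u = x the max elem; w ≤ u since w ∈ p and u ≥ all
            exact hxub w hwm
          · rw [hcnt u huv] at hcu
            exact hmin u (by
              rcases List.mem_append.mp hu with h | h
              · exact h
              · simp at h; exact absurd h huv) hcu
    · have hxv : x < v := lt_of_le_of_ne (hub x hxm) (fun h => hvx h.symm)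
      have hvnot : v ∉ p := fun hvp => absurd (hxub v hvp) (not_le.mpr hxv)
      have hcntv : ((p ++ [v]).count v : Int) = 1 := by
        rw [cnt_app]
        simp [List.count_eq_zero_of_not_mem hvnot]
      have hcnt : ∀ y, y ≠ v → ((p ++ [v]).count y : Int) = (p.count y : Int) := by
        intro y hy; rw [cnt_app]; rw [if_neg (fun h : v = y => hy h.symm)]; simp
      have hnlt : ¬ bc < 1 := by omega
      have hstep : bStep (some w, bc, some x, cc) v = (some w, bc, some v, 1) := by
        simp [bStep, fun h => hvx (by exact h), hnlt]
      rw [hstep]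
      refine ⟨by simp, fun _ => ⟨w, v, rfl, rfl, by simp, ?_, hcntv.symm,
        List.mem_append.mpr (Or.inl hwm), ?_, ?_, ?_⟩⟩
      · intro y hy
        rcases List.mem_append.mp hy with h | h
        · exact hub y h
        · simp at h; simp [h]
      · have hwv : w ≠ v := fun h => hvnot (h ▸ hwm)
        rw [hcnt w hwv]; exact hbc
      · intro u hu
        by_cases huv : u = v
        · subst huv; rw [hcntv]; omega
        · rw [hcnt u huv]
          exact hmax u (by
            rcases List.mem_append.mp hu with h | h
            · exact h
            · simp at h; exact absurd h huv)
      · intro u hu hcu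
        by_cases huv : u = v
        · subst huv
          exact le_of_lt (lt_of_le_of_lt (hxub w hwm) hxv)
        · rw [hcnt u huv] at hcu
          exact hmin u (by
            rcases List.mem_append.mp hu with h | h
            · exact h
            · simp at h; exact absurd h huv) hcu


lemma InvB_fold : ∀ (l p : List String) (st : Option String × Int × Option String × Int),
    (∀ a ∈ p, ∀ b ∈ l, a ≤ b) → l.Pairwise (· ≤ ·) → InvB p st →
    InvB (p ++ l) (l.foldl bStep st) := by
  intro l
  induction l with
  | nil => intro p st _ _ h; simpa using h
  | cons v t ih =>
    intro p st hcross hpw hinv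
    have hstep : InvB (p ++ [v]) (bStep st v) :=
      InvB_step p st v hinv (fun y hy => hcross y hy v List.mem_cons_self)
    have h2 := ih (p ++ [v]) (bStep st v)
      (by
        intro a ha b hb
        rcases List.mem_append.mp ha with h | h
        · exact hcross a h b (List.mem_cons_of_mem _ hb)
        · simp at h; subst h
          exact (List.pairwise_cons.mp hpw).1 b hb)
      (List.pairwise_cons.mp hpw).2 hstep
    simpa using h2

-- B's result is the winner
lemma B_VSpec (votes : List String) (hne : votes ≠ []) :
    VSpec votes (find_winner_of_election_alt votes) := by
  set s := PySem.List.sorted votes (fun x => x) false with hs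
  have hperm : s.Perm votes := PySem.List.sorted_perm votes (fun x => x) false
  have hpw : s.Pairwise (· ≤ ·) := by
    have := PySem.List.sorted_pairwise votes (fun x => x)
    simpa using this
  have hsne : s ≠ [] := by
    intro h
    have h2 := hperm
    rw [h] at h2
    exact hne h2.symm.eq_nil
  have hinv := InvB_fold s [] (none, 0, none, 0) (by simp) hpw
    (by exact ⟨fun _ => ⟨rfl, rfl, rfl, rfl⟩, fun h => absurd rfl h⟩)
  simp only [List.nil_append] at hinv
  obtain ⟨_, hcons⟩ := hinv
  obtain ⟨w, x, hb, _, _, _, _, hwm, hbc, hmax, hmin⟩ := hcons hsne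
  have hres : find_winner_of_election_alt votes = w := by
    unfold find_winner_of_election_alt
    rw [← hs]
    show (match (s.foldl bStep (none, 0, none, 0)).1 with | some c => c | none => "") = w
    rw [hb]
  rw [hres]
  have hcnteq : ∀ y, s.count y = votes.count y := fun y => hperm.count_eq y
  refine ⟨hperm.mem_iff.mp hwm, ?_, ?_⟩
  · intro v hv
    have := hmax v (hperm.mem_iff.mpr hv)
    rw [hbc] at this
    rw [← hcnteq v, ← hcnteq w]
    exact_mod_cast this
  · intro v hv hc
    apply hmin v (hperm.mem_iff.mpr hv)
    rw [hbc, hcnteq v, hcnteq w]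
    exact_mod_cast hc

-- ===== VERDICT (by name: the statement is the Claim_ definition above) =====
theorem find_winner_of_election_spec : Claim_equal_find_winner_of_election := by
  intro votes _ hpre
  unfold Spec_find_winner_of_election
  exact VSpec_unique (A_VSpec votes hpre) (B_VSpec votes hpre)
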